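-- pv_equiv track=rewrite | github.com/Josverl/mpflash | reporting/build_reporting_db.py | _collect_version_stats
-- ===== SOURCE A (Python) =====
-- from typing import Sequence
--
-- def _collect_version_stats(rows: Sequence[tuple[str, ...]], versions: Sequence[str]) -> list[tuple[int, str, int, int, int, int]]:
--     rows_by_version: dict[str, list[tuple[str, ...]]] = {v: [] for v in versions}
--     for row in rows:
--         version = row[0]
--         rows_by_version.setdefault(version, []).append(row)
--
--     stats: list[tuple[int, str, int, int, int, int]] = []
--     for index, version in enumerate(versions):
--         version_rows = rows_by_version.get(version, [])
--         boards_found = sum(1 for row in version_rows if row[4] == "")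
--         board_variants_found = sum(1 for row in version_rows if row[4] != "")
--         ports_found = len({row[5] for row in version_rows if row[5]})
--         total_rows = len(version_rows)
--         stats.append((index, version, boards_found, board_variants_found, ports_found, total_rows))
--     return stats
-- ===== SOURCE B (Python) =====
-- from typing import Sequence
--
-- def _collect_version_stats(rows: Sequence[tuple[str, ...]], versions: Sequence[str]) -> list[tuple[int, str, int, int, int, int]]:
--     acc: dict[str, list] = {v: [0, 0, set(), 0] for v in versions}
--     for row in rows:
--         entry = acc.get(row[0])
--         if entry is None:
--             continue
--         if row[4] == "":
--             entry[0] += 1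
--         else:
--             entry[1] += 1
--         if row[5]:
--             entry[2].add(row[5])
--         entry[3] += 1
--     return [(i, v, acc[v][0], acc[v][1], len(acc[v][2]), acc[v][3])
--             for i, v in enumerate(versions)]
-- ===== Notes on version B (the rewrite author's own statement) =====
-- stated objective: alternative
-- what changed: Replaces grouping rows into per-version lists followed by four separate reductions per version with a single accumulating pass over rows that maintains (boards, variants, port-set, total) counters per version.
import Mathlib
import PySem

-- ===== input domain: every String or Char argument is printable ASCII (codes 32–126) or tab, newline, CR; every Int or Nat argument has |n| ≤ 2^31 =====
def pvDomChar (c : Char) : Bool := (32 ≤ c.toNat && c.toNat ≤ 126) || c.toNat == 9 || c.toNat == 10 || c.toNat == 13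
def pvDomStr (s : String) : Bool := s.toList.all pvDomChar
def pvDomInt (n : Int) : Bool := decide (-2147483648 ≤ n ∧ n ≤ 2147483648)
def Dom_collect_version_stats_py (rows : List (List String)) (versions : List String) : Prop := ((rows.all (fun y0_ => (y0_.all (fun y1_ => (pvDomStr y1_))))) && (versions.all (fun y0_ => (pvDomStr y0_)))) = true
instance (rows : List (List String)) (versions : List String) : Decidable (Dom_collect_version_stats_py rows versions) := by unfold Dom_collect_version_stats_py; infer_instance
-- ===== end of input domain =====

-- B replaces A's group-then-four-reductions with one accumulating pass over rows keeping
-- per-version counters (a different decomposition: one traversal of rows instead of grouping plus four scans per version).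


-- ===== PORT A =====
-- row[i] is ported as PySem.List.pyGetD row i "": exact under Pre_, which guarantees the index is in range wherever A reads it.
def collect_version_stats_py (rows : List (List String)) (versions : List String) : List (Int × String × Int × Int × Int × Int) :=
  let d0 : PySem.Dict String (List (List String)) :=
    versions.foldl (fun d v => d.insert v []) PySem.Dict.empty
  -- rows_by_version.setdefault(version, []).append(row)  ≡  d[version] = d.get(version, []) + [row]
  let d := rows.foldl (fun d row => d.modify (PySem.List.pyGetD row 0 "") [] (fun l => l ++ [row])) d0
  (PySem.List.enumerate versions 0).map (fun p =>
    let version_rows := d.getD p.2 []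
    let boards_found : Int := ((version_rows.filter (fun row => PySem.List.pyGetD row 4 "" == "")).map (fun _ => (1 : Int))).sum
    let board_variants_found : Int := ((version_rows.filter (fun row => !(PySem.List.pyGetD row 4 "" == ""))).map (fun _ => (1 : Int))).sum
    let ports_found : Int := (PySem.Set.ofList ((version_rows.filter (fun row => !(PySem.List.pyGetD row 5 "" == ""))).map (fun row => PySem.List.pyGetD row 5 ""))).length
    let total_rows : Int := version_rows.length
    (p.1, p.2, boards_found, board_variants_found, ports_found, total_rows))

-- ===== PORT B =====
-- one step of B's accumulating pass: update the counters of row's version (if tracked)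
def pvStepB (d : PySem.Dict String (Int × Int × PySem.Set String × Int)) (row : List String) :
    PySem.Dict String (Int × Int × PySem.Set String × Int) :=
  match d.get? (PySem.List.pyGetD row 0 "") with
  | none => d
  | some (b, va, s, t) =>
      d.insert (PySem.List.pyGetD row 0 "")
        ((if PySem.List.pyGetD row 4 "" == "" then b + 1 else b),
         (if PySem.List.pyGetD row 4 "" == "" then va else va + 1),
         (if !(PySem.List.pyGetD row 5 "" == "") then s.add (PySem.List.pyGetD row 5 "") else s),
         t + 1)

def collect_version_stats_py_alt (rows : List (List String)) (versions : List String) : List (Int × String × Int × Int × Int × Int) :=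
  let acc0 : PySem.Dict String (Int × Int × PySem.Set String × Int) :=
    versions.foldl (fun d v => d.insert v (0, 0, PySem.Set.empty, 0)) PySem.Dict.empty
  let acc := rows.foldl pvStepB acc0
  (PySem.List.enumerate versions 0).map (fun p =>
    let e := acc.getD p.2 (0, 0, PySem.Set.empty, 0)
    (p.1, p.2, e.1, e.2.1, (e.2.2.1.length : Int), e.2.2.2))

-- ===== PRECONDITION & SPEC =====
-- Pre_ excludes exactly the inputs where A raises IndexError: an empty row (A reads row[0] of every
-- row) or a row of length < 6 whose first entry is one of the tracked versions (A reads row[4], row[5] of those).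
def Pre_collect_version_stats_py (rows : List (List String)) (versions : List String) : Prop :=
  ∀ row ∈ rows, row ≠ [] ∧ (PySem.List.pyGetD row 0 "" ∈ versions → 6 ≤ row.length)
instance (rows : List (List String)) (versions : List String) : Decidable (Pre_collect_version_stats_py rows versions) := by unfold Pre_collect_version_stats_py; infer_instance

def pvWitness_collect_version_stats_py : List (List String) × List String :=
  ([["1.22", "ESP32", "esp32", "x", "", "esp32"], ["1.22", "RP2", "rp2", "x", "RISCV", "rp2"], ["9.9"]], ["1.22", "1.23"])

def Spec_collect_version_stats_py (rows : List (List String)) (versions : List String) (out : List (Int × String × Int × Int × Int × Int)) : Prop := out = collect_version_stats_py_alt rows versions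
instance (rows : List (List String)) (versions : List String) (out : List (Int × String × Int × Int × Int × Int)) : Decidable (Spec_collect_version_stats_py rows versions out) := by unfold Spec_collect_version_stats_py; infer_instance

-- ===== CLAIM (what is proved, stated in full; the proofs are below) =====
def Claim_equal_collect_version_stats_py : Prop := ∀ (rows : List (List String)) (versions : List String), Dom_collect_version_stats_py rows versions → Pre_collect_version_stats_py rows versions → Spec_collect_version_stats_py rows versions (collect_version_stats_py rows versions)

-- ===== LEMMAS AND PROOFS =====

-- the initial dicts: getD at the inserted constant is that constant
theorem pv_init_getD {ν : Type} (vs : List String) (c : ν) (d : PySem.Dict String ν) (x : String)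
    (h : d.getD x c = c) : (vs.foldl (fun d v => d.insert v c) d).getD x c = c := by
  induction vs generalizing d with
  | nil => exact h
  | cons v vs ih =>
      simp only [List.foldl_cons]
      exact ih _ (by rw [PySem.Dict.getD_insert]; split <;> [rfl; exact h])

-- the initial dicts contain exactly the versions
theorem pv_init_contains {ν : Type} (vs : List String) (c : ν) (d : PySem.Dict String ν) (x : String) :
    (vs.foldl (fun d v => d.insert v c) d).contains x = (d.contains x || decide (x ∈ vs)) := by
  induction vs generalizing d with
  | nil => simp
  | cons v vs ih =>
      simp only [List.foldl_cons, ih, PySem.Dict.contains_insert, List.mem_cons]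
      by_cases hx : x = v
      · simp [hx]
      · have hb : (x == v) = false := beq_eq_false_iff_ne.mpr hx
        simp [hb, hx]

-- A's grouping loop: keyed variant of PySem.Dict.getD_foldl_modify_append
theorem pv_groupA (l : List (List String)) (d : PySem.Dict String (List (List String))) (v : String) :
    (l.foldl (fun d row => d.modify (PySem.List.pyGetD row 0 "") [] (fun l => l ++ [row])) d).getD v []
      = d.getD v [] ++ l.filter (fun row => PySem.List.pyGetD row 0 "" == v) := by
  induction l generalizing d with
  | nil => simp
  | cons r l ih =>
      rw [List.foldl_cons, List.filter_cons, ih, PySem.Dict.getD_modify]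
      by_cases h : PySem.List.pyGetD r 0 "" = v
      · rw [if_pos h.symm, if_pos (beq_iff_eq.mpr h), h]
        simp
      · rw [if_neg (fun hv => h hv.symm), if_neg (fun hb => h (beq_iff_eq.mp hb))]

-- B's step keeps the key set
theorem pv_stepB_contains (d : PySem.Dict String (Int × Int × PySem.Set String × Int)) (row : List String) (x : String) :
    (pvStepB d row).contains x = d.contains x := by
  unfold pvStepB
  cases h : d.get? (PySem.List.pyGetD row 0 "") with
  | none => rfl
  | some e =>
      obtain ⟨b, va, s, t⟩ := e
      rw [PySem.Dict.contains_insert]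
      by_cases hx : x = PySem.List.pyGetD row 0 ""
      · have hcx : d.contains (PySem.List.pyGetD row 0 "") = true := by
          rw [PySem.Dict.contains_eq_isSome_get?, h]; rfl
        rw [hx, hcx]; simp
      · have hb : (x == PySem.List.pyGetD row 0 "") = false := beq_eq_false_iff_ne.mpr hx
        rw [hb]; simp

-- B's step does not touch the entry of any other key
theorem pv_stepB_getD_ne (d : PySem.Dict String (Int × Int × PySem.Set String × Int)) (row : List String) (x : String)
    (hx : x ≠ PySem.List.pyGetD row 0 "") :
    (pvStepB d row).getD x (0, 0, PySem.Set.empty, 0) = d.getD x (0, 0, PySem.Set.empty, 0) := by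
  unfold pvStepB
  cases h : d.get? (PySem.List.pyGetD row 0 "") with
  | none => rfl
  | some e =>
      obtain ⟨b, va, s, t⟩ := e
      rw [PySem.Dict.getD_insert, if_neg hx]

-- the per-row counter update, on the plain state
def pvG (e : Int × Int × PySem.Set String × Int) (row : List String) : Int × Int × PySem.Set String × Int :=
  ((if PySem.List.pyGetD row 4 "" == "" then e.1 + 1 else e.1),
   (if PySem.List.pyGetD row 4 "" == "" then e.2.1 else e.2.1 + 1),
   (if !(PySem.List.pyGetD row 5 "" == "") then e.2.2.1.add (PySem.List.pyGetD row 5 "") else e.2.2.1),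
   e.2.2.2 + 1)

-- B's dict fold, read at a tracked version v, is the state fold of pvG over the rows keyed v
theorem pv_foldB (l : List (List String)) (d : PySem.Dict String (Int × Int × PySem.Set String × Int)) (v : String)
    (hv : d.contains v = true) :
    (l.foldl pvStepB d).getD v (0, 0, PySem.Set.empty, 0)
      = (l.filter (fun row => PySem.List.pyGetD row 0 "" == v)).foldl pvG (d.getD v (0, 0, PySem.Set.empty, 0)) := by
  induction l generalizing d with
  | nil => simp
  | cons r l ih =>
      rw [List.foldl_cons, List.filter_cons]
      have hcv : (pvStepB d r).contains v = true := by rw [pv_stepB_contains]; exact hv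
      by_cases h : PySem.List.pyGetD r 0 "" = v
      · have hsome : (d.get? v).isSome = true := by
          rw [← PySem.Dict.contains_eq_isSome_get?]; exact hv
        obtain ⟨e, he⟩ := Option.isSome_iff_exists.mp hsome
        obtain ⟨b, va, s, t⟩ := e
        have hd : d.getD v (0, 0, PySem.Set.empty, 0) = (b, va, s, t) := by
          rw [PySem.Dict.getD_eq_get?_getD, he]; rfl
        have hstep : pvStepB d r = d.insert v (pvG (b, va, s, t) r) := by
          unfold pvStepB; rw [h, he]; rfl
        rw [if_pos (beq_iff_eq.mpr h), ih _ hcv, hstep,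
            PySem.Dict.getD_insert, if_pos rfl, List.foldl_cons, hd]
      · rw [if_neg (fun hb => h (beq_iff_eq.mp hb)), ih _ hcv,
            pv_stepB_getD_ne d r v (fun hvv => h hvv.symm)]

-- the state fold of pvG from any state computes A's four reductions
theorem pv_foldG (l : List (List String)) (b va : Int) (s : PySem.Set String) (t : Int) :
    l.foldl pvG (b, va, s, t)
      = (b + ((l.filter (fun row => PySem.List.pyGetD row 4 "" == "")).map (fun _ => (1 : Int))).sum,
         va + ((l.filter (fun row => !(PySem.List.pyGetD row 4 "" == ""))).map (fun _ => (1 : Int))).sum,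
         l.foldl (fun s row => if !(PySem.List.pyGetD row 5 "" == "") then PySem.Set.add s (PySem.List.pyGetD row 5 "") else s) s,
         t + l.length) := by
  induction l generalizing b va s t with
  | nil => simp
  | cons r l ih =>
      rw [List.foldl_cons, List.foldl_cons,
          show pvG (b, va, s, t) r
            = ((if PySem.List.pyGetD r 4 "" == "" then b + 1 else b),
               (if PySem.List.pyGetD r 4 "" == "" then va else va + 1),
               (if !(PySem.List.pyGetD r 5 "" == "") then s.add (PySem.List.pyGetD r 5 "") else s),
               t + 1) from rfl,
          ih, List.filter_cons, List.filter_cons, List.length_cons]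
      by_cases h4 : PySem.List.pyGetD r 4 "" = "" <;>
        by_cases h5 : PySem.List.pyGetD r 5 "" = "" <;>
          simp [h4, h5, Prod.ext_iff] <;> omega

-- a guarded Set.add fold is Set.ofList of the filtered-and-mapped values
theorem pv_set_fold (l : List (List String)) (s : PySem.Set String) :
    l.foldl (fun s row => if !(PySem.List.pyGetD row 5 "" == "") then PySem.Set.add s (PySem.List.pyGetD row 5 "") else s) s
      = ((l.filter (fun row => !(PySem.List.pyGetD row 5 "" == ""))).map (fun row => PySem.List.pyGetD row 5 "")).foldl PySem.Set.add s := by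
  induction l generalizing s with
  | nil => rfl
  | cons r l ih =>
      rw [List.foldl_cons, List.filter_cons]
      by_cases h : PySem.List.pyGetD r 5 "" = ""
      · rw [if_neg (by simp [h]), if_neg (by simp [h]), ih]
      · have hb : (PySem.List.pyGetD r 5 "" == "") = false := beq_eq_false_iff_ne.mpr h
        rw [if_pos (by simp [hb]), if_pos (by simp [hb]), List.map_cons, List.foldl_cons, ih]

-- ===== VERDICT (by name: the statement is the Claim_ definition above) =====
theorem collect_version_stats_py_spec : Claim_equal_collect_version_stats_py := by
  intro rows versions _hdom _hpre
  unfold Spec_collect_version_stats_py collect_version_stats_py collect_version_stats_py_alt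
  apply List.map_congr_left
  intro p hp
  have hv : p.2 ∈ versions := by
    have h1 : p.2 ∈ (PySem.List.enumerate versions 0).map (·.2) := List.mem_map_of_mem hp
    rwa [PySem.List.map_snd_enumerate] at h1
  rw [pv_groupA, pv_init_getD _ _ _ _ (by rw [PySem.Dict.getD_empty])]
  have hc0 : (versions.foldl (fun d v => d.insert v ((0 : Int), (0 : Int), (PySem.Set.empty : PySem.Set String), (0 : Int))) PySem.Dict.empty).contains p.2 = true := by
    rw [pv_init_contains]; simp [hv]
  rw [pv_foldB _ _ _ hc0,
      pv_init_getD _ _ _ _ (by rw [PySem.Dict.getD_empty]),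
      pv_foldG, pv_set_fold]
  simp [PySem.Set.ofList_eq_foldl, PySem.Set.empty]
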